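-- pv_equiv track=rewrite | github.com/Keloo/top-coder-challenge | logic.py | generate_polynomial_terms
-- ===== SOURCE A (Python) =====
-- from typing import List, Tuple
--
-- def generate_polynomial_terms(degree: int) -> List[Tuple[int, int, int]]:
--     """
--     Generate all possible terms for a polynomial of given degree with 3 variables.
--     Each term is represented as (power_of_days, power_of_miles, power_of_receipts).
--
--     Args:
--         degree: Maximum degree of the polynomial
--
--     Returns:
--         List of tuples representing the powers of each variable in each term
--     """
--     terms = []
--     for d in range(degree + 1):
--         for m in range(degree + 1):
--             for r in range(degree + 1):
--                 if d + m + r <= degree: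
--                     terms.append((d, m, r))
--     return terms
-- ===== SOURCE B (Python) =====
-- def generate_polynomial_terms(degree):
--     """Precompute, for every remaining budget b, the list of (m, r) suffix pairs with
--     m + r <= b; then extend each suffix table entry with its leading exponent d."""
--     pairs = [[(m, r) for m in range(b + 1) for r in range(b - m + 1)]
--              for b in range(degree + 1)]
--     return [(d, m, r) for d in range(degree + 1) for (m, r) in pairs[degree - d]]
-- ===== Notes on version B (the rewrite author's own statement) =====
-- stated objective: alternative
-- what changed: Replaces the three fixed nested loops with a sum test by precomputing, for each remaining budget b, the table of (m, r) suffix pairs with m + r <= b, and then extending the table entry for budget degree - d with each leading exponent d; no filter test remains and the inner ranges are budget-bounded.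
import Mathlib
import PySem

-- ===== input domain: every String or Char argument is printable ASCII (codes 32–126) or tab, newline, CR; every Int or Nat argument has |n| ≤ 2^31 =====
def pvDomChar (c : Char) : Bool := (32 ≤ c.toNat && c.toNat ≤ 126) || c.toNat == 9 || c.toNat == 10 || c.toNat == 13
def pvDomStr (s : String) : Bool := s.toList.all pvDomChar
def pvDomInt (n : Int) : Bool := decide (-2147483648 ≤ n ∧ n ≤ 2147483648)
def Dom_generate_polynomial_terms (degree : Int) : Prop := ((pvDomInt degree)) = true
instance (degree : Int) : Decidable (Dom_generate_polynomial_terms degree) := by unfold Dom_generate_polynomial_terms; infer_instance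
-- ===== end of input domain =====

-- B replaces the three fixed nested loops with a sum test by a precomputed table of (m, r) suffix pairs per remaining budget, indexed by degree - d: alternative decomposition, same output order.

-- ===== PORT A =====
def generate_polynomial_terms (degree : Int) : List (Int × Int × Int) :=
  (PySem.List.pyRange 0 (degree + 1) 1).foldl (fun terms d =>
    (PySem.List.pyRange 0 (degree + 1) 1).foldl (fun terms m =>
      (PySem.List.pyRange 0 (degree + 1) 1).foldl (fun terms r =>
        if d + m + r ≤ degree then terms ++ [(d, m, r)] else terms) terms) terms) []

-- ===== PORT B =====
-- pairs[degree - d] ported as pyGetD with default []; exact here since 0 ≤ degree - d < length pairs for every d the outer range yields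
def generate_polynomial_terms_alt (degree : Int) : List (Int × Int × Int) :=
  let pairs : List (List (Int × Int)) :=
    (PySem.List.pyRange 0 (degree + 1) 1).map (fun b =>
      (PySem.List.pyRange 0 (b + 1) 1).flatMap (fun m =>
        (PySem.List.pyRange 0 (b - m + 1) 1).map (fun r => (m, r))))
  (PySem.List.pyRange 0 (degree + 1) 1).flatMap (fun d =>
    (PySem.List.pyGetD pairs (degree - d) []).map (fun p => (d, p.1, p.2)))

-- ===== PRECONDITION & SPEC =====
def Spec_generate_polynomial_terms (degree : Int) (out : List (Int × Int × Int)) : Prop := out = generate_polynomial_terms_alt degree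
instance (degree : Int) (out : List (Int × Int × Int)) : Decidable (Spec_generate_polynomial_terms degree out) := by unfold Spec_generate_polynomial_terms; infer_instance

-- ===== CLAIM (what is proved, stated in full; the proofs are below) =====
def Claim_equal_generate_polynomial_terms : Prop := ∀ (degree : Int), Dom_generate_polynomial_terms degree → Spec_generate_polynomial_terms degree (generate_polynomial_terms degree)

-- ===== LEMMAS AND PROOFS =====

-- A's three nested append-loops as nested flatMaps with an inner filter
theorem pvA_closed (degree : Int) :
    generate_polynomial_terms degree =
      (PySem.List.pyRange 0 (degree + 1) 1).flatMap (fun d =>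
        (PySem.List.pyRange 0 (degree + 1) 1).flatMap (fun m =>
          ((PySem.List.pyRange 0 (degree + 1) 1).filter (fun r => decide (d + m + r ≤ degree))).map
            (fun r => (d, m, r)))) := by
  unfold generate_polynomial_terms
  simp only [PySem.List.foldl_append_ite, PySem.List.foldl_append_eq_flatMap, List.nil_append]

-- a range filtered by an upper bound is the shorter range
theorem pvFilter_range (degree c : Int) (hc : 0 ≤ c) :
    (PySem.List.pyRange 0 (degree + 1) 1).filter (fun r => decide (c + r ≤ degree)) =
      PySem.List.pyRange 0 (degree - c + 1) 1 := by
  by_cases h : 0 ≤ degree - c + 1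
  · rw [PySem.List.pyRange_one_append 0 (degree - c + 1) (degree + 1) h (by omega),
        List.filter_append]
    have h1 : (PySem.List.pyRange 0 (degree - c + 1) 1).filter
        (fun r => decide (c + r ≤ degree)) = PySem.List.pyRange 0 (degree - c + 1) 1 := by
      apply List.filter_eq_self.mpr
      intro x hx
      rw [PySem.List.mem_pyRange_one] at hx
      simp; omega
    have h2 : (PySem.List.pyRange (degree - c + 1) (degree + 1) 1).filter
        (fun r => decide (c + r ≤ degree)) = [] := by
      apply List.filter_eq_nil_iff.mpr
      intro x hx
      rw [PySem.List.mem_pyRange_one] at hx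
      simp; omega
    rw [h1, h2, List.append_nil]
  · rw [PySem.List.pyRange_one_eq_nil (by omega : degree - c + 1 ≤ 0)]
    apply List.filter_eq_nil_iff.mpr
    intro x hx
    rw [PySem.List.mem_pyRange_one] at hx
    simp; omega

-- a flatMap over a range may be truncated where the function is empty
theorem pvFlatMap_trunc {α : Type} (n k : Int) (g : Int → List α) (h0 : 0 ≤ k) (hk : k ≤ n)
    (hg : ∀ x, k ≤ x → g x = []) :
    (PySem.List.pyRange 0 n 1).flatMap g = (PySem.List.pyRange 0 k 1).flatMap g := by
  rw [PySem.List.pyRange_one_append 0 k n h0 hk, List.flatMap_append]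
  have : (PySem.List.pyRange k n 1).flatMap g = [] := by
    apply List.flatMap_eq_nil_iff.mpr
    intro x hx
    rw [PySem.List.mem_pyRange_one] at hx
    exact hg x hx.1
  rw [this, List.append_nil]

-- ===== VERDICT (by name: the statement is the Claim_ definition above) =====
theorem generate_polynomial_terms_spec : Claim_equal_generate_polynomial_terms := by
  intro degree _
  show generate_polynomial_terms degree = generate_polynomial_terms_alt degree
  rw [pvA_closed]
  unfold generate_polynomial_terms_alt
  apply congrArg List.flatten
  apply List.map_congr_left
  intro d hd
  rw [PySem.List.mem_pyRange_one] at hd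
  -- resolve the table lookup: pairs[degree - d] is the suffix list for budget degree - d
  rw [PySem.List.pyGetD_map_pyRange_of_nonneg _ (degree + 1) (degree - d) [] (by omega) (by omega)]
  -- truncate A's middle loop to the m with a nonempty contribution
  rw [pvFlatMap_trunc (degree + 1) (degree - d + 1)
        (fun m => ((PySem.List.pyRange 0 (degree + 1) 1).filter
          (fun r => decide (d + m + r ≤ degree))).map (fun r => (d, m, r)))
        (by omega) (by omega)
        (by
          intro m hm
          dsimp only
          rw [pvFilter_range degree (d + m) (by omega)]
          rw [show degree - (d + m) + 1 = degree - d - m + 1 by ring]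
          rw [PySem.List.pyRange_one_eq_nil (by omega)]
          rfl)]
  -- push the prefix map inside B's flatMap and compare the per-m lists
  rw [List.map_flatMap]
  apply congrArg List.flatten
  apply List.map_congr_left
  intro m hm
  rw [PySem.List.mem_pyRange_one] at hm
  rw [pvFilter_range degree (d + m) (by omega)]
  rw [show degree - (d + m) + 1 = degree - d - m + 1 by ring]
  simp
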